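-- pv_equiv track=rewrite | github.com/MichalxPZ/PUT-HackerRank-Python | PastTests/sumInDiagonal.py | diag_sum
-- ===== SOURCE A (Python) =====
-- def diag_sum(mat):
--     max_sum = 0
--     for i in range(len(mat[0])):
--         start_col = i
--         start_row = 0
--         forward_diag = [[] for _ in range((2*len(mat) + 2*len(mat[0]) -2)//2)]
--         backward_diag = [[] for _ in range((2*len(mat) + 2*len(mat[0]) -2)//2)]
--         for j in range(len(mat[0])):
--             for k in range(len(mat)):
--                 forward_diag[j + k].append(mat[k][j])
--                 backward_diag[j - k + len(mat)-1].append(mat[k][j])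
--     for i in forward_diag:
--         summ = 0
--         for j in i:
--             summ += j
--         max_sum = max(summ, max_sum)
--     for i in backward_diag:
--         summ = 0
--         for j in i:
--             summ += j
--         max_sum = max(summ, max_sum)
--
--     return max_sum
-- ===== SOURCE B (Python) =====
-- def diag_sum(mat):
--     m, n = len(mat), len(mat[0])
--     best = 0
--     # anti-diagonals (j + k == d): walk each one from its topmost cell
--     for d in range(m + n - 1):
--         k = 0 if d < n else d - n + 1
--         j = d - k
--         s = 0
--         while k < m and j >= 0:
--             s += mat[k][j]
--             k += 1
--             j -= 1
--         if s > best: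
--             best = s
--     # main diagonals (j - k == c): walk each one from its topmost cell
--     for c in range(1 - m, n):
--         k = 0 if c >= 0 else -c
--         j = c + k
--         s = 0
--         while k < m and j < n:
--             s += mat[k][j]
--             k += 1
--             j += 1
--         if s > best:
--             best = s
--     return best
-- ===== Notes on version B (the rewrite author's own statement) =====
-- stated objective: faster
-- what changed: B visits each diagonal exactly once, walking it with a two-index cursor from its topmost cell and keeping a running sum and max, instead of A's scatter of every cell into per-diagonal bucket lists rebuilt len(mat[0]) times and summed afterwards.
-- crash fix: On a nonempty matrix whose first row is empty, A raises NameError (forward_diag is never created because the outer loop body never runs) while B returns 0. — e.g. on diag_sum([[]]): A raises UnboundLocalError, B returns 0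
import Mathlib
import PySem

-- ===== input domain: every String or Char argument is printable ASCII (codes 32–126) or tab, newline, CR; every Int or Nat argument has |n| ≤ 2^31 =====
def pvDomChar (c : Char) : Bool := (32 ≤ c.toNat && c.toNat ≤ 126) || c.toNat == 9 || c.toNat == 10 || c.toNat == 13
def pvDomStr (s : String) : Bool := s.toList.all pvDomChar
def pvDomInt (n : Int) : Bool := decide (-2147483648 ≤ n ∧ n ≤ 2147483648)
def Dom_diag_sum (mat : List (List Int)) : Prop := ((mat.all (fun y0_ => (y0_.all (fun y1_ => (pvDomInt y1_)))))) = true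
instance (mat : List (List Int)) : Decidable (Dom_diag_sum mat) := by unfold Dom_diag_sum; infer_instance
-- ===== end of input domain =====

-- B walks each diagonal once from its topmost cell with a two-index cursor (no bucket arrays
-- at all), instead of A's repeated scatter of every cell into per-diagonal bucket lists
-- (objective: faster, asymptotic).

-- ===== PORT A =====
-- hand port notes: 'forward_diag[i].append(v)' / indexing assignment is List.modify (exact here:
-- inside Pre_ every index is in range, so Python never raises); mat[k][j] is PySem.List.pyGetD
-- (exact inside Pre_, where the indices are in range).
def diag_sum (mat : List (List Int)) : Int :=
  let m : Int := PySem.List.len mat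
  let n : Int := PySem.List.len (PySem.List.pyGetD mat 0 [])
  let size : Nat := (PySem.Int.floordiv (2*m + 2*n - 2) 2).toNat
  let fb :=
    (PySem.List.pyRange 0 n).foldl
      (fun _ _ =>
        (PySem.List.pyRange 0 n).foldl
          (fun fb j =>
            (PySem.List.pyRange 0 m).foldl
              (fun fb2 k =>
                (fb2.1.modify (j + k).toNat (fun l => l ++ [PySem.List.pyGetD (PySem.List.pyGetD mat k []) j 0]),
                 fb2.2.modify (j - k + m - 1).toNat (fun l => l ++ [PySem.List.pyGetD (PySem.List.pyGetD mat k []) j 0])))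
              fb)
          (List.replicate size ([] : List Int), List.replicate size ([] : List Int)))
      (List.replicate size ([] : List Int), List.replicate size ([] : List Int))
  let ms1 := fb.1.foldl (fun acc bucket => max (bucket.foldl (fun s x => s + x) 0) acc) 0
  fb.2.foldl (fun acc bucket => max (bucket.foldl (fun s x => s + x) 0) acc) ms1

-- ===== PORT B =====
-- hand port notes: each Python 'while' loop is the structural recursion walkAnti / walkMain on
-- the same cursor state (k, j, s), terminating because m - k shrinks; mat[k][j] is
-- PySem.List.pyGetD (in range inside Pre_).
def walkAnti (mat : List (List Int)) (m : Int) (k j s : Int) : Int :=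
  if _h : k < m ∧ 0 ≤ j then
    walkAnti mat m (k + 1) (j - 1) (s + PySem.List.pyGetD (PySem.List.pyGetD mat k []) j 0)
  else s
termination_by (m - k).toNat
decreasing_by omega

def walkMain (mat : List (List Int)) (m n : Int) (k j s : Int) : Int :=
  if _h : k < m ∧ j < n then
    walkMain mat m n (k + 1) (j + 1) (s + PySem.List.pyGetD (PySem.List.pyGetD mat k []) j 0)
  else s
termination_by (m - k).toNat
decreasing_by omega

def diag_sum_alt (mat : List (List Int)) : Int :=
  let m : Int := PySem.List.len mat
  let n : Int := PySem.List.len (PySem.List.pyGetD mat 0 [])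
  let best :=
    (PySem.List.pyRange 0 (m + n - 1)).foldl
      (fun best d =>
        let k := if d < n then 0 else d - n + 1
        let s := walkAnti mat m k (d - k) 0
        if best < s then s else best) 0
  (PySem.List.pyRange (1 - m) n).foldl
    (fun best c =>
      let k := if 0 ≤ c then 0 else -c
      let s := walkMain mat m n k (c + k) 0
      if best < s then s else best) best

-- ===== PRECONDITION & SPEC =====
-- Pre_ is exactly A's return domain: A raises IndexError on an empty matrix, NameError when the
-- first row is empty, and IndexError when some row is shorter than the first row.
def Pre_diag_sum (mat : List (List Int)) : Prop :=
  mat ≠ [] ∧ mat.headD [] ≠ [] ∧ ∀ row ∈ mat, (mat.headD []).length ≤ row.length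
instance (mat : List (List Int)) : Decidable (Pre_diag_sum mat) := by unfold Pre_diag_sum; infer_instance
def pvWitness_diag_sum : List (List Int) := [[1, 2], [3, 4]]

-- On a nonempty matrix whose first row is empty, A raises NameError (its bucket lists are never
-- created) while B returns 0.
def Raises_diag_sum (mat : List (List Int)) : Prop := mat ≠ [] ∧ mat.headD [] = []
instance (mat : List (List Int)) : Decidable (Raises_diag_sum mat) := by unfold Raises_diag_sum; infer_instance
def pvRaiseWitness_diag_sum : List (List Int) := [[]]
def pvRaiseWitnessOut_diag_sum : Int := 0

def Spec_diag_sum (mat : List (List Int)) (out : Int) : Prop := out = diag_sum_alt mat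
instance (mat : List (List Int)) (out : Int) : Decidable (Spec_diag_sum mat out) := by unfold Spec_diag_sum; infer_instance

-- ===== CLAIM (what is proved, stated in full; the proofs are below) =====
def Claim_equal_diag_sum : Prop := ∀ (mat : List (List Int)), Dom_diag_sum mat → Pre_diag_sum mat → Spec_diag_sum mat (diag_sum mat)
def Claim_raises_diag_sum : Prop := (∀ (mat : List (List Int)), Dom_diag_sum mat → Raises_diag_sum mat → ¬ Pre_diag_sum mat) ∧ (Dom_diag_sum (pvRaiseWitness_diag_sum) ∧ Raises_diag_sum (pvRaiseWitness_diag_sum) ∧ diag_sum_alt (pvRaiseWitness_diag_sum) = pvRaiseWitnessOut_diag_sum)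

-- ===== LEMMAS AND PROOFS =====

-- mat[k][j], abbreviated for the proofs
def pvCell (mat : List (List Int)) (k j : Int) : Int :=
  PySem.List.pyGetD (PySem.List.pyGetD mat k []) j 0

-- a fold whose step ignores its arguments returns the constant once the list is nonempty
theorem pvFoldlConst {α σ : Type} (l : List α) (c a : σ) (h : l ≠ []) :
    l.foldl (fun _ _ => c) a = c := by
  cases l with
  | nil => exact absurd rfl h
  | cons x t =>
    have aux : ∀ (t : List α), t.foldl (fun _ _ => c) c = c := by
      intro t; induction t with
      | nil => rfl
      | cons y s ih => simpa using ih
    simpa using aux t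

-- a nested fold over two lists is a fold over the pair list
theorem pvFoldlFoldlFlatMap {α β σ : Type} (l1 : List α) (l2 : List β) (g : σ → α → β → σ) :
    ∀ init, l1.foldl (fun s a => l2.foldl (fun s b => g s a b) s) init
      = (l1.flatMap (fun a => l2.map (Prod.mk a))).foldl (fun s p => g s p.1 p.2) init := by
  induction l1 with
  | nil => intro init; rfl
  | cons a t ih =>
    intro init
    simp only [List.foldl_cons, List.flatMap_cons, List.foldl_append, List.foldl_map, ih]

-- splitting a nested fold with an independent pair accumulator
theorem pvFoldl2Prod {α β σ τ : Type} (l1 : List α) (l2 : List β)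
    (f1 : σ → α → β → σ) (f2 : τ → α → β → τ) :
    ∀ (a : σ) (b : τ),
      l1.foldl (fun s x => l2.foldl (fun s y => (f1 s.1 x y, f2 s.2 x y)) s) (a, b)
        = (l1.foldl (fun s x => l2.foldl (fun s y => f1 s x y) s) a,
           l1.foldl (fun s x => l2.foldl (fun s y => f2 s x y) s) b) := by
  induction l1 with
  | nil => intro a b; rfl
  | cons x t ih =>
    intro a b
    simp only [List.foldl_cons]
    rw [PySem.List.foldl_prod_mk (f := fun s y => f1 s x y) (g := fun s y => f2 s x y), ih]

-- the two traversal orders of a rectangle are permutations of each other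
theorem pvProductPerm (l1 l2 : List Int) (h1 : l1.Nodup) (h2 : l2.Nodup) :
    (l1.flatMap (fun a => l2.map (fun b => (a, b)))).Perm
      (l2.flatMap (fun b => l1.map (fun a => (a, b)))) := by
  have nd : ∀ (u v : List Int), u.Nodup → v.Nodup →
      (u.flatMap (fun a => v.map (fun b => (a, b)))).Nodup := by
    intro u v hu hv
    rw [List.nodup_flatMap]
    constructor
    · intro a _
      exact hv.map (fun x y hxy => by simpa using congrArg Prod.snd hxy)
    · refine hu.imp ?_
      intro a a' hne p hp hp'
      simp only [List.mem_map] at hp hp'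
      obtain ⟨b, _, rfl⟩ := hp
      obtain ⟨b', _, h'⟩ := hp'
      exact hne (congrArg Prod.fst h').symm
  have nd2 : ∀ (u v : List Int), u.Nodup → v.Nodup →
      (v.flatMap (fun b => u.map (fun a => (a, b)))).Nodup := by
    intro u v hu hv
    rw [List.nodup_flatMap]
    constructor
    · intro b _
      exact hu.map (fun x y hxy => by simpa using congrArg Prod.fst hxy)
    · refine hv.imp ?_
      intro b b' hne p hp hp'
      simp only [List.mem_map] at hp hp'
      obtain ⟨a, _, rfl⟩ := hp
      obtain ⟨a', _, h'⟩ := hp'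
      exact hne (congrArg Prod.snd h').symm
  rw [List.perm_ext_iff_of_nodup (nd l1 l2 h1 h2) (nd2 l1 l2 h1 h2)]
  intro p
  simp only [List.mem_flatMap, List.mem_map]
  constructor
  · rintro ⟨a, ha, b, hb, rfl⟩; exact ⟨b, hb, a, ha, rfl⟩
  · rintro ⟨b, hb, a, ha, rfl⟩; exact ⟨a, ha, b, hb, rfl⟩

-- scatter characterization: after the append-into-bucket fold, bucket d holds exactly the
-- values of the items whose index is d, in order
theorem pvBuckets {α : Type} (P : List α) (idx : α → Nat) (val : α → Int) :
    ∀ (F : List (List Int)) (d : Nat),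
      (P.foldl (fun F p => F.modify (idx p) (fun l => l ++ [val p])) F)[d]? =
      (F[d]?).map (fun l => l ++ (P.filter (fun p => idx p == d)).map val) := by
  induction P with
  | nil => intro F d; cases h : F[d]? <;> simp [h]
  | cons p P ih =>
    intro F d
    rw [List.foldl_cons, ih]
    have hmod : (F.modify (idx p) (fun l => l ++ [val p]))[d]? =
        if idx p = d then F[d]?.map (fun l => l ++ [val p]) else F[d]? := by
      rw [List.getElem?_modify]; split_ifs <;> cases F[d]? <;> simp_all
    rw [hmod]
    by_cases h : idx p = d
    · simp only [h, if_pos rfl, List.filter_cons, beq_iff_eq, h, if_pos rfl]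
      cases F[d]? <;> simp
    · have hb : (idx p == d) = false := by simp [h]
      simp [h, hb, List.filter_cons]

-- the whole bucket array, as a map over its indices
theorem pvFoldBuckets {α : Type} (P : List α) (idx : α → Nat) (val : α → Int) (size : Nat) :
    P.foldl (fun F p => F.modify (idx p) (fun l => l ++ [val p])) (List.replicate size ([] : List Int))
      = (List.range size).map (fun d => (P.filter (fun p => idx p == d)).map val) := by
  apply List.ext_getElem?
  intro d
  rw [pvBuckets]
  by_cases h : d < size
  · simp [List.getElem?_replicate, h, List.getElem?_range, h]
  · simp [List.getElem?_replicate, h, List.getElem?_range]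

-- range filtered by an equality test is a singleton or empty
theorem pvRangeFilter (N v : Nat) :
    (List.range N).filter (fun t => t == v) = if v < N then [v] else [] := by
  induction N with
  | zero => simp
  | succ N ih =>
    rw [List.range_succ, List.filter_append, ih]
    by_cases h : v < N
    · have h1 : v < N + 1 := by omega
      have hne : N ≠ v := by omega
      simp [h, h1, hne]
    · by_cases h2 : v = N
      · subst h2; simp [h]
      · have h3 : ¬ v < N + 1 := by omega
        have hne : N ≠ v := fun e => h2 e.symm
        simp [h, h3, hne]

theorem pvPyRangeFilter (n c : Int) :
    (PySem.List.pyRange 0 n 1).filter (fun j => j == c) = if 0 ≤ c ∧ c < n then [c] else [] := by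
  by_cases hc : 0 ≤ c ∧ c < n
  · rw [if_pos hc, PySem.List.pyRange_one, List.filter_map]
    have hcong : ∀ t ∈ List.range (n - 0).toNat,
        ((fun j => j == c) ∘ fun k : Nat => (0:Int) + k) t = (t == c.toNat) := by
      intro t _
      simp only [Function.comp, zero_add]
      by_cases h : (t : Int) = c
      · have h2 : t = c.toNat := by omega
        rw [show ((t:Int) == c) = true from by simp [h], show (t == c.toNat) = true from by simp [h2]]
      · have h2 : t ≠ c.toNat := by omega
        rw [show ((t:Int) == c) = false from by simp [h], show (t == c.toNat) = false from by simp [h2]]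
    rw [List.filter_congr hcong, pvRangeFilter]
    have hlt : c.toNat < (n - 0).toNat := by omega
    rw [if_pos hlt]
    simp
    omega
  · rw [if_neg hc, List.filter_eq_nil_iff]
    intro x hx
    rw [PySem.List.mem_pyRange_one] at hx
    simp only [beq_iff_eq]
    omega

-- sum of a flatMap is the sum of the inner sums
theorem pvSumFlatMap {α : Type} (l : List α) (g : α → List Int) :
    (l.flatMap g).sum = (l.map (fun x => (g x).sum)).sum := by
  induction l with
  | nil => rfl
  | cons a t ih => simp [List.flatMap_cons, ih]

-- sum of the values scattered into bucket d, computed per row k of the rectangle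
theorem pvFilterSum (mat : List (List Int)) (m n : Int) (off : Int → Int) (d : Nat)
    (hnn : ∀ k j : Int, 0 ≤ k → k < m → 0 ≤ j → 0 ≤ j + off k) :
    ((((PySem.List.pyRange 0 n 1).flatMap (fun j => (PySem.List.pyRange 0 m 1).map (Prod.mk j))).filter
        (fun p => (p.1 + off p.2).toNat == d)).map (fun p : Int × Int => pvCell mat p.2 p.1)).sum
    = ((PySem.List.pyRange 0 m 1).map
        (fun k => if 0 ≤ (d:Int) - off k ∧ (d:Int) - off k < n then pvCell mat k ((d:Int) - off k) else 0)).sum := by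
  have hperm := pvProductPerm (PySem.List.pyRange 0 n 1) (PySem.List.pyRange 0 m 1)
    (PySem.List.nodup_pyRange_one 0 n) (PySem.List.nodup_pyRange_one 0 m)
  rw [List.Perm.sum_eq ((hperm.filter _).map _)]
  rw [List.filter_flatMap, List.map_flatMap, pvSumFlatMap]
  refine congrArg List.sum (List.map_congr_left ?_)
  intro k hk
  rw [PySem.List.mem_pyRange_one] at hk
  rw [List.filter_map, List.map_map]
  have hcong : ∀ j ∈ PySem.List.pyRange 0 n 1,
      ((fun p : Int × Int => (p.1 + off p.2).toNat == d) ∘ fun j => (j, k)) j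
        = (j == (d:Int) - off k) := by
    intro j hj
    rw [PySem.List.mem_pyRange_one] at hj
    simp only [Function.comp]
    have h0 : 0 ≤ j + off k := hnn k j hk.1 hk.2 hj.1
    by_cases h : j = (d:Int) - off k
    · rw [show ((j + off k).toNat == d) = true from by simp; omega,
        show (j == (d:Int) - off k) = true from by simp [h]]
    · rw [show ((j + off k).toNat == d) = false from by simp; omega,
        show (j == (d:Int) - off k) = false from by simp [h]]
  rw [List.filter_congr hcong, pvPyRangeFilter]
  by_cases hg : 0 ≤ (d:Int) - off k ∧ (d:Int) - off k < n
  · rw [if_pos hg, if_pos hg]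
    simp [Function.comp]
  · rw [if_neg hg, if_neg hg]
    simp

-- the anti-diagonal walk computes the guarded sum over the remaining rows
theorem pvWalkAnti (mat : List (List Int)) (m n d : Int) :
    ∀ (N : Nat) (k s : Int), (m - k).toNat ≤ N → d - k < n →
      walkAnti mat m k (d - k) s
        = s + ((PySem.List.pyRange k m 1).map
            (fun k' => if 0 ≤ d - k' ∧ d - k' < n then pvCell mat k' (d - k') else 0)).sum := by
  intro N
  induction N with
  | zero =>
    intro k s hN _
    rw [walkAnti, dif_neg (by omega), PySem.List.pyRange_one_eq_nil (by omega)]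
    simp
  | succ N ih =>
    intro k s hN hn
    by_cases hg : k < m ∧ 0 ≤ d - k
    · rw [walkAnti, dif_pos hg]
      rw [show d - k - 1 = d - (k + 1) from by ring]
      rw [ih (k + 1) _ (by omega) (by omega)]
      rw [PySem.List.pyRange_one_cons hg.1]
      rw [List.map_cons, List.sum_cons, if_pos ⟨hg.2, hn⟩]
      show s + pvCell mat k (d - k) + _ = _
      ring
    · rw [walkAnti, dif_neg hg]
      have hz : ((PySem.List.pyRange k m 1).map
          (fun k' => if 0 ≤ d - k' ∧ d - k' < n then pvCell mat k' (d - k') else 0)).sum = 0 := by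
        apply List.sum_eq_zero
        intro x hx
        rw [List.mem_map] at hx
        obtain ⟨k', hk', rfl⟩ := hx
        rw [PySem.List.mem_pyRange_one] at hk'
        rw [if_neg (by omega)]
      omega

-- the main-diagonal walk computes the guarded sum over the remaining rows
theorem pvWalkMain (mat : List (List Int)) (m n c : Int) :
    ∀ (N : Nat) (k s : Int), (m - k).toNat ≤ N → 0 ≤ c + k →
      walkMain mat m n k (c + k) s
        = s + ((PySem.List.pyRange k m 1).map
            (fun k' => if 0 ≤ c + k' ∧ c + k' < n then pvCell mat k' (c + k') else 0)).sum := by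
  intro N
  induction N with
  | zero =>
    intro k s hN _
    rw [walkMain, dif_neg (by omega), PySem.List.pyRange_one_eq_nil (by omega)]
    simp
  | succ N ih =>
    intro k s hN hp
    by_cases hg : k < m ∧ c + k < n
    · rw [walkMain, dif_pos hg]
      rw [show c + k + 1 = c + (k + 1) from by ring]
      rw [ih (k + 1) _ (by omega) (by omega)]
      rw [PySem.List.pyRange_one_cons hg.1]
      rw [List.map_cons, List.sum_cons, if_pos ⟨hp, hg.2⟩]
      show s + pvCell mat k (c + k) + _ = _
      ring
    · rw [walkMain, dif_neg hg]
      have hz : ((PySem.List.pyRange k m 1).map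
          (fun k' => if 0 ≤ c + k' ∧ c + k' < n then pvCell mat k' (c + k') else 0)).sum = 0 := by
        apply List.sum_eq_zero
        intro x hx
        rw [List.mem_map] at hx
        obtain ⟨k', hk', rfl⟩ := hx
        rw [PySem.List.mem_pyRange_one] at hk'
        rw [if_neg (by omega)]
      omega

-- the guarded per-row sum for one anti-diagonal is what B's walk from its top cell computes
theorem pvAntiDiag (mat : List (List Int)) (m n d : Int) (hm : 0 ≤ m)
    (hd0 : 0 ≤ d) (hd : d < m + n - 1) :
    ((PySem.List.pyRange 0 m 1).map
        (fun k => if 0 ≤ d - k ∧ d - k < n then pvCell mat k (d - k) else 0)).sum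
      = walkAnti mat m (if d < n then 0 else d - n + 1) (d - (if d < n then 0 else d - n + 1)) 0 := by
  have hcase : (if d < n then (0:Int) else d - n + 1) = 0 ∨ (if d < n then (0:Int) else d - n + 1) = d - n + 1 ∧ n ≤ d := by
    split_ifs with h
    · left; rfl
    · right; exact ⟨rfl, by omega⟩
  set k0 := if d < n then (0:Int) else d - n + 1 with hk0
  have hb : 0 ≤ k0 ∧ k0 ≤ m ∧ d - k0 < n := by rcases hcase with h | ⟨h, h2⟩ <;> omega
  rw [pvWalkAnti mat m n d (m - k0).toNat k0 0 (le_refl _) hb.2.2, zero_add]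
  rw [PySem.List.pyRange_one_append 0 k0 m hb.1 hb.2.1, List.map_append, List.sum_append]
  have hz : ((PySem.List.pyRange 0 k0 1).map
      (fun k => if 0 ≤ d - k ∧ d - k < n then pvCell mat k (d - k) else 0)).sum = 0 := by
    apply List.sum_eq_zero
    intro x hx
    rw [List.mem_map] at hx
    obtain ⟨k', hk', rfl⟩ := hx
    rw [PySem.List.mem_pyRange_one] at hk'
    rcases hcase with h | ⟨h, h2⟩
    · rw [if_neg (by omega)]
    · rw [if_neg (by omega)]
  omega

-- the guarded per-row sum for one main diagonal is what B's walk from its top cell computes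
theorem pvMainDiag (mat : List (List Int)) (m n c : Int) (hm : 0 ≤ m) (hc1 : 1 - m ≤ c) :
    ((PySem.List.pyRange 0 m 1).map
        (fun k => if 0 ≤ c + k ∧ c + k < n then pvCell mat k (c + k) else 0)).sum
      = walkMain mat m n (if 0 ≤ c then 0 else -c) (c + (if 0 ≤ c then 0 else -c)) 0 := by
  have hcase : (if 0 ≤ c then (0:Int) else -c) = 0 ∧ 0 ≤ c ∨ (if 0 ≤ c then (0:Int) else -c) = -c ∧ c < 0 := by
    split_ifs with h
    · left; exact ⟨rfl, h⟩
    · right; exact ⟨rfl, by omega⟩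
  set k0 := if 0 ≤ c then (0:Int) else -c with hk0
  have hb : 0 ≤ k0 ∧ k0 ≤ m ∧ 0 ≤ c + k0 := by rcases hcase with ⟨h, h2⟩ | ⟨h, h2⟩ <;> omega
  rw [pvWalkMain mat m n c (m - k0).toNat k0 0 (le_refl _) hb.2.2, zero_add]
  rw [PySem.List.pyRange_one_append 0 k0 m hb.1 hb.2.1, List.map_append, List.sum_append]
  have hz : ((PySem.List.pyRange 0 k0 1).map
      (fun k => if 0 ≤ c + k ∧ c + k < n then pvCell mat k (c + k) else 0)).sum = 0 := by
    apply List.sum_eq_zero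
    intro x hx
    rw [List.mem_map] at hx
    obtain ⟨k', hk', rfl⟩ := hx
    rw [PySem.List.mem_pyRange_one] at hk'
    rcases hcase with ⟨h, h2⟩ | ⟨h, h2⟩
    · rw [if_neg (by omega)]
    · rw [if_neg (by omega)]
  omega

-- one backward bucket, re-indexed by its constant column-minus-row offset
theorem pvBwdDiag (mat : List (List Int)) (m n : Int) (d : Nat) (hm : 0 < m) (hd : (d:Int) < m + n - 1) :
    ((PySem.List.pyRange 0 m 1).map
        (fun k => if 0 ≤ (d:Int) - (m - 1 - k) ∧ (d:Int) - (m - 1 - k) < n then pvCell mat k ((d:Int) - (m - 1 - k)) else 0)).sum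
      = walkMain mat m n (if 0 ≤ 1 - m + (d:Int) then 0 else -(1 - m + (d:Int)))
          ((1 - m + (d:Int)) + (if 0 ≤ 1 - m + (d:Int) then 0 else -(1 - m + (d:Int)))) 0 := by
  have hfun : (fun k : Int => if 0 ≤ (d:Int) - (m - 1 - k) ∧ (d:Int) - (m - 1 - k) < n then pvCell mat k ((d:Int) - (m - 1 - k)) else 0)
      = (fun k : Int => if 0 ≤ (1 - m + (d:Int)) + k ∧ (1 - m + (d:Int)) + k < n then pvCell mat k ((1 - m + (d:Int)) + k) else 0) := by
    funext k
    rw [show (d:Int) - (m - 1 - k) = (1 - m + (d:Int)) + k from by ring]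
  rw [hfun]
  exact pvMainDiag mat m n (1 - m + (d:Int)) (by omega) (by omega)

-- congruence for a two-stage fold over one index list
theorem pvFoldl2Congr {σ α : Type} (l : List α) (f1 g1 f2 g2 : σ → α → σ) (init : σ)
    (h1 : ∀ acc x, x ∈ l → f1 acc x = g1 acc x) (h2 : ∀ acc x, x ∈ l → f2 acc x = g2 acc x) :
    l.foldl f2 (l.foldl f1 init) = l.foldl g2 (l.foldl g1 init) := by
  have e1 : l.foldl f1 init = l.foldl g1 init := PySem.List.foldl_congr_mem _ _ _ _ h1
  rw [e1]
  exact PySem.List.foldl_congr_mem _ _ _ _ h2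

-- ===== VERDICT (by name: the statement is the Claim_ definition above) =====
theorem diag_sum_spec : Claim_equal_diag_sum := by
  intro mat _ hpre
  obtain ⟨hne, hhd, -⟩ := hpre
  unfold Spec_diag_sum
  cases mat with
  | nil => exact absurd rfl hne
  | cons r t =>
  simp only [List.headD_cons] at hhd
  have h0 : PySem.List.pyGetD (r :: t) 0 [] = r := by
    simp [PySem.List.pyGetD, PySem.List.pyGet?, PySem.List.pyIdx?]
  simp only [diag_sum, diag_sum_alt, h0]
  set m : Int := PySem.List.len (r :: t) with hm
  set n : Int := PySem.List.len r with hn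
  have hmpos : 0 < m := by
    rw [hm]; simp only [PySem.List.len_eq, List.length_cons]; positivity
  have hnpos : 0 < n := by
    rw [hn]; simp only [PySem.List.len_eq]
    exact_mod_cast List.length_pos_iff.mpr hhd
  have hsize : (PySem.Int.floordiv (2*m + 2*n - 2) 2).toNat = (m + n - 1).toNat := by
    rw [PySem.Int.floordiv_eq_ediv_of_pos (by norm_num)]
    congr 1; omega
  rw [hsize]
  set size : Nat := (m + n - 1).toNat with hsizedef
  have hrne : PySem.List.pyRange 0 n ≠ [] := by
    rw [PySem.List.pyRange_one_cons hnpos]; simp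
  rw [pvFoldlConst _ _ _ hrne]
  rw [pvFoldl2Prod (PySem.List.pyRange 0 n) (PySem.List.pyRange 0 m)
      (f1 := fun (F : List (List Int)) (j k : Int) => F.modify (j + k).toNat (fun l => l ++ [PySem.List.pyGetD (PySem.List.pyGetD (r :: t) k []) j 0]))
      (f2 := fun (F : List (List Int)) (j k : Int) => F.modify (j - k + m - 1).toNat (fun l => l ++ [PySem.List.pyGetD (PySem.List.pyGetD (r :: t) k []) j 0]))]
  dsimp only
  -- rewrite the backward bucket index into the 'column + offset(row)' shape
  rw [PySem.List.foldl_congr_mem (PySem.List.pyRange 0 n)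
      (fun (s : List (List Int)) (x : Int) =>
        List.foldl (fun (s : List (List Int)) (y : Int) =>
          s.modify (x - y + m - 1).toNat fun l => l ++ [PySem.List.pyGetD (PySem.List.pyGetD (r :: t) y []) x 0])
          s (PySem.List.pyRange 0 m))
      (fun (s : List (List Int)) (x : Int) =>
        List.foldl (fun (s : List (List Int)) (y : Int) =>
          s.modify (x + (m - 1 - y)).toNat fun l => l ++ [PySem.List.pyGetD (PySem.List.pyGetD (r :: t) y []) x 0])
          s (PySem.List.pyRange 0 m))
      (List.replicate size [])
      (by
        intro acc x _
        refine PySem.List.foldl_congr_mem _ _ _ _ ?_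
        intro acc2 y _
        rw [show x - y + m - 1 = x + (m - 1 - y) from by ring])]
  -- flatten the two nested scatter loops into folds over the pair list
  rw [pvFoldlFoldlFlatMap (PySem.List.pyRange 0 n) (PySem.List.pyRange 0 m)
      (g := fun (s : List (List Int)) (j k : Int) =>
        s.modify (j + k).toNat fun l => l ++ [PySem.List.pyGetD (PySem.List.pyGetD (r :: t) k []) j 0])]
  rw [pvFoldlFoldlFlatMap (PySem.List.pyRange 0 n) (PySem.List.pyRange 0 m)
      (g := fun (s : List (List Int)) (j k : Int) =>
        s.modify (j + (m - 1 - k)).toNat fun l => l ++ [PySem.List.pyGetD (PySem.List.pyGetD (r :: t) k []) j 0])]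
  -- bucket arrays, characterised index by index
  have hF1 := pvFoldBuckets ((PySem.List.pyRange 0 n).flatMap (fun a => (PySem.List.pyRange 0 m).map (Prod.mk a)))
      (fun p : Int × Int => (p.1 + p.2).toNat)
      (fun p : Int × Int => PySem.List.pyGetD (PySem.List.pyGetD (r :: t) p.2 []) p.1 0) size
  have hF2 := pvFoldBuckets ((PySem.List.pyRange 0 n).flatMap (fun a => (PySem.List.pyRange 0 m).map (Prod.mk a)))
      (fun p : Int × Int => (p.1 + (m - 1 - p.2)).toNat)
      (fun p : Int × Int => PySem.List.pyGetD (PySem.List.pyGetD (r :: t) p.2 []) p.1 0) size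
  simp only [] at hF1 hF2
  rw [hF1, hF2]
  -- B's two index ranges are the same index list
  rw [show PySem.List.pyRange 0 (m + n - 1) 1 = (List.range size).map (fun k : Nat => (0:Int) + k) from by
    rw [PySem.List.pyRange_one]; simp only [sub_zero]; rfl]
  rw [show PySem.List.pyRange (1 - m) n 1 = (List.range size).map (fun k : Nat => (1 - m) + k) from by
    rw [PySem.List.pyRange_one, show n - (1 - m) = m + n - 1 from by ring]]
  simp only [List.foldl_map, zero_add]
  -- stage-by-stage, index-by-index comparison
  apply pvFoldl2Congr
  · -- forward diagonals
    intro acc d hd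
    rw [List.mem_range] at hd
    rw [PySem.List.foldl_add, zero_add]
    have hFS := pvFilterSum (r :: t) m n (fun k => k) d (by intro k j hk1 hk2 hj; show 0 ≤ j + k; omega)
    simp only [pvCell] at hFS
    rw [hFS]
    have hAD := pvAntiDiag (r :: t) m n (d : Int) (by omega) (by omega) (by omega)
    simp only [pvCell] at hAD
    rw [hAD]
    split_ifs with h <;> omega
  · -- backward diagonals
    intro acc d hd
    rw [List.mem_range] at hd
    rw [PySem.List.foldl_add, zero_add]
    have hFS := pvFilterSum (r :: t) m n (fun k => m - 1 - k) d (by intro k j hk1 hk2 hj; show 0 ≤ j + (m - 1 - k); omega)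
    simp only [pvCell] at hFS
    rw [hFS]
    have hBD := pvBwdDiag (r :: t) m n d (by omega) (by omega)
    simp only [pvCell] at hBD
    rw [hBD]
    split_ifs with h <;> omega

theorem diag_sum_raises : Claim_raises_diag_sum := by
  unfold Claim_raises_diag_sum
  constructor
  · rintro mat _ ⟨hne, hhd⟩ ⟨_, hhd', _⟩; exact hhd' hhd
  · decide

-- self-check: the raise witness does lie inside Raises_ (projection of diag_sum_raises)
theorem pvRaiseWitness_ok : Raises_diag_sum pvRaiseWitness_diag_sum := diag_sum_raises.2.2.1
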